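-- pv_equiv track=rewrite | github.com/IngweLand/PracticingAlgorithms | sudoku.py | calculate_hints
-- ===== SOURCE A (Python) =====
-- def calculate_hints(values) -> dict:
--     hints = {}
--     for c_key, cell in values:
--         for item in cell:
--             if item not in hints:
--                 hints[item] = (0, [])
--             keys = hints[item][1]
--             keys.append(c_key)
--             hints[item] = (hints[item][0] + 1, keys)
--     return hints
-- ===== SOURCE B (Python) =====
-- def calculate_hints(values) -> dict:
--     pairs = [(item, c_key) for c_key, cell in values for item in cell]
--     hints = {}
--     for item, _ in pairs:
--         if item not in hints:
--             keys = [k for it, k in pairs if it == item]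
--             hints[item] = (len(keys), keys)
--     return hints
-- ===== Notes on version B (the rewrite author's own statement) =====
-- stated objective: alternative
-- what changed: A maintains one dict of (count, keys) pairs incrementally inside a nested loop; B first flattens values into a list of (item, key) pairs and then, for each distinct item in first-occurrence order, computes its key list by an independent filter scan of the flattened list and its count as that list's length (brute-force per-key scans instead of incremental dict maintenance).
import Mathlib
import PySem

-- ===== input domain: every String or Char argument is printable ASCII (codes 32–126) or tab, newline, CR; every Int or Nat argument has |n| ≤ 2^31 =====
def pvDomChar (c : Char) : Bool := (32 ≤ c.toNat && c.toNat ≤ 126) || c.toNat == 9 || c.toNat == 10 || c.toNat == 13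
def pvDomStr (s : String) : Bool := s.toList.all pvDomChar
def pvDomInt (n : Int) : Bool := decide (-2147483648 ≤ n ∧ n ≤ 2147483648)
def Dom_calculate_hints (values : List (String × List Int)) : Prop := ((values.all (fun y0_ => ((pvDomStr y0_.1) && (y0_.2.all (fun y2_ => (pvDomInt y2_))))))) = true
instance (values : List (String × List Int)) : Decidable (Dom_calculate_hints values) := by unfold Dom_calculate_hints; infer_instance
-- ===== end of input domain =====

-- B replaces A's incremental dict of (count, keys) pairs by a flatten-then-scan algorithm:
-- flatten values to (item, key) pairs, then for each distinct item (first occurrence order)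
-- recompute its key list by filtering the flattened list (objective: alternative, not faster).

-- ===== PORT A =====
-- Python `hints[item]` after the membership guard always finds the key, so `getD` with
-- default (0, []) is exact here (the default is never taken).
def calculate_hints (values : List (String × List Int)) : List (Int × Int × List String) :=
  (values.foldl (fun hints p =>
    p.2.foldl (fun hints item =>
      let hints := if hints.contains item then hints else hints.insert item (0, ([] : List String))
      let keys := (hints.getD item (0, [])).2 ++ [p.1]
      hints.insert item ((hints.getD item (0, [])).1 + 1, keys)) hints)
    (PySem.Dict.empty : PySem.Dict Int (Int × List String))).items

-- ===== PORT B =====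
def calculate_hints_alt (values : List (String × List Int)) : List (Int × Int × List String) :=
  let pairs := values.flatMap (fun p => p.2.map (fun item => (item, p.1)))
  (pairs.foldl (fun hints q =>
      if hints.contains q.1 then hints
      else
        let keys := (pairs.filter (fun r => r.1 == q.1)).map (·.2)
        hints.insert q.1 ((keys.length : Int), keys))
    (PySem.Dict.empty : PySem.Dict Int (Int × List String))).items

-- ===== PRECONDITION & SPEC =====
def Spec_calculate_hints (values : List (String × List Int)) (out : List (Int × Int × List String)) : Prop := out = calculate_hints_alt values
instance (values : List (String × List Int)) (out : List (Int × Int × List String)) : Decidable (Spec_calculate_hints values out) := by unfold Spec_calculate_hints; infer_instance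

-- ===== CLAIM (what is proved, stated in full; the proofs are below) =====
def Claim_equal_calculate_hints : Prop := ∀ (values : List (String × List Int)), Dom_calculate_hints values → Spec_calculate_hints values (calculate_hints values)

-- ===== LEMMAS AND PROOFS =====
-- toA lifts the key-list dict to A's dict of (count, keys) pairs.
def toA (d : PySem.Dict Int (List String)) : PySem.Dict Int (Int × List String) :=
  PySem.Dict.mk (d.items.map (fun q => (q.1, ((q.2.length : Int), q.2))))

theorem contains_toA (d : PySem.Dict Int (List String)) (k : Int) :
    (toA d).contains k = d.contains k := by
  simp [toA, PySem.Dict.contains, List.any_map, Function.comp_def]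

theorem get?_toA (d : PySem.Dict Int (List String)) (k : Int) :
    (toA d).get? k = Option.map (fun v => ((v.length : Int), v)) (d.get? k) := by
  simp [toA, PySem.Dict.get?, List.find?_map, Function.comp_def]

theorem getD_toA (d : PySem.Dict Int (List String)) (k : Int) :
    (toA d).getD k (0, []) = (((d.getD k []).length : Int), d.getD k []) := by
  simp only [PySem.Dict.getD, get?_toA]
  cases d.get? k <;> simp

theorem toA_insert (d : PySem.Dict Int (List String)) (k : Int) (v : List String) :
    toA (d.insert k v) = (toA d).insert k ((v.length : Int), v) := by
  simp only [toA, PySem.Dict.insert]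
  by_cases h : d.contains k
  · have h2 : (toA d).contains k = true := by rw [contains_toA]; exact h
    simp only [toA] at h2
    simp only [h, h2, if_true, List.map_map]
    congr 1
    apply List.map_congr_left
    intro p _
    by_cases hp : p.1 = k <;> simp [hp]
  · have h2 : (toA d).contains k = false := by rw [contains_toA]; simpa using h
    simp only [toA] at h2
    simp [h, h2]

theorem step_lemma (ck : String) (item : Int) (d : PySem.Dict Int (List String)) :
    (let hints := if (toA d).contains item then toA d else (toA d).insert item (0, ([] : List String))
     let keys := (hints.getD item (0, [])).2 ++ [ck]
     hints.insert item ((hints.getD item (0, [])).1 + 1, keys))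
    = toA (d.modify item [] (· ++ [ck])) := by
  simp only [PySem.Dict.modify, toA_insert, contains_toA]
  by_cases h : d.contains item
  · simp only [h, if_true, getD_toA]
    congr 2
    simp [add_comm]
  · have hd : d.getD item [] = [] := PySem.Dict.getD_of_not_contains d (k := item) [] (by simpa using h)
    simp only [h, if_false, Bool.false_eq_true, PySem.Dict.getD_insert_self,
      PySem.Dict.insert_insert_self, hd]
    simp

theorem inner_lemma (ck : String) (cell : List Int) (d : PySem.Dict Int (List String)) :
    cell.foldl (fun hints item =>
      let hints := if hints.contains item then hints else hints.insert item (0, ([] : List String))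
      let keys := (hints.getD item (0, [])).2 ++ [ck]
      hints.insert item ((hints.getD item (0, [])).1 + 1, keys)) (toA d)
    = toA (cell.foldl (fun d item => d.modify item [] (· ++ [ck])) d) := by
  induction cell generalizing d with
  | nil => rfl
  | cons x xs ih => simpa only [List.foldl_cons, step_lemma] using ih (d.modify x [] (· ++ [ck]))

theorem outer_lemma (values : List (String × List Int)) (d : PySem.Dict Int (List String)) :
    values.foldl (fun hints p =>
      p.2.foldl (fun hints item =>
        let hints := if hints.contains item then hints else hints.insert item (0, ([] : List String))
        let keys := (hints.getD item (0, [])).2 ++ [p.1]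
        hints.insert item ((hints.getD item (0, [])).1 + 1, keys)) hints) (toA d)
    = toA (values.foldl (fun d p => p.2.foldl (fun d item => d.modify item [] (· ++ [p.1])) d) d) := by
  induction values generalizing d with
  | nil => rfl
  | cons x xs ih => simpa only [List.foldl_cons, inner_lemma] using ih _

-- the nested modify-fold over values equals the modify-fold over the flattened pair list
theorem mf_pairs (values : List (String × List Int)) (d : PySem.Dict Int (List String)) :
    values.foldl (fun d p => p.2.foldl (fun d item => d.modify item [] (· ++ [p.1])) d) d
    = (values.flatMap (fun p => p.2.map (fun item => (item, p.1)))).foldl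
        (fun d q => d.modify q.1 [] (· ++ [q.2])) d := by
  induction values generalizing d with
  | nil => rfl
  | cons x xs ih =>
    simp only [List.foldl_cons, List.flatMap_cons, List.foldl_append, List.foldl_map]
    exact ih _

theorem contains_mk_map (g : Int → Int × List String) (s : List Int) (k : Int) :
    (PySem.Dict.mk (s.map (fun j => (j, g j)))).contains k = s.contains k := by
  simp only [PySem.Dict.contains, List.any_map, Function.comp_def]
  induction s with
  | nil => simp
  | cons x xs ih =>
    simp only [List.any_cons, ih]
    by_cases h : x = k
    · simp [h]
    · simp [beq_iff_eq, h, Ne.symm h]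

-- B's first-occurrence insert loop builds exactly the map over the deduplicated key list
theorem foldB_lemma (g : Int → Int × List String) (l : List (Int × String)) (s : List Int) :
    l.foldl (fun hints q =>
        if hints.contains q.1 then hints
        else hints.insert q.1 (g q.1))
      (PySem.Dict.mk (s.map (fun j => (j, g j))))
    = PySem.Dict.mk ((PySem.Set.update s (l.map Prod.fst)).map (fun j => (j, g j))) := by
  induction l generalizing s with
  | nil => simp [PySem.Set.update]
  | cons q rest ih =>
    simp only [List.foldl_cons, List.map_cons, PySem.Set.update_cons, contains_mk_map]
    by_cases h : q.1 ∈ s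
    · have hc : s.contains q.1 = true := by simpa using h
      rw [hc, if_pos rfl, PySem.Set.add_of_mem h]
      exact ih s
    · have hc : s.contains q.1 = false := by simpa using h
      have hnc : (PySem.Dict.mk (s.map (fun j => (j, g j)))).contains q.1 = false := by
        rw [contains_mk_map]; exact hc
      rw [hc, if_neg (by simp), PySem.Set.add_of_not_mem h]
      have : (PySem.Dict.mk (s.map (fun j => (j, g j)))).insert q.1 (g q.1)
          = PySem.Dict.mk ((s ++ [q.1]).map (fun j => (j, g j))) := by
        apply PySem.Dict.ext
        simp [PySem.Dict.items_insert, hnc]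
      rw [this]
      exact ih (s ++ [q.1])

-- ===== VERDICT (by name: the statement is the Claim_ definition above) =====
theorem calculate_hints_spec : Claim_equal_calculate_hints := by
  intro values _
  unfold Spec_calculate_hints
  simp only [calculate_hints, calculate_hints_alt]
  set pairs := values.flatMap (fun p => p.2.map (fun item => (item, p.1))) with hpairs
  -- A side
  have hA : values.foldl (fun hints p =>
      p.2.foldl (fun hints item =>
        let hints := if hints.contains item then hints else hints.insert item (0, ([] : List String))
        let keys := (hints.getD item (0, [])).2 ++ [p.1]
        hints.insert item ((hints.getD item (0, [])).1 + 1, keys)) hints)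
      (PySem.Dict.empty : PySem.Dict Int (Int × List String))
      = toA (pairs.foldl (fun d q => d.modify q.1 [] (· ++ [q.2])) PySem.Dict.empty) := by
    have h0 : (PySem.Dict.empty : PySem.Dict Int (Int × List String)) = toA PySem.Dict.empty := rfl
    rw [h0, outer_lemma, mf_pairs]
  rw [hA]
  -- B side
  have hB := foldB_lemma (fun k =>
    ((((pairs.filter (fun r => r.1 == k)).map (·.2)).length : Int),
      (pairs.filter (fun r => r.1 == k)).map (·.2))) pairs []
  beta_reduce at hB
  simp only [List.map_nil] at hB
  have he : (PySem.Dict.mk ([] : List (Int × (Int × List String)))) = PySem.Dict.empty := rfl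
  rw [he] at hB
  rw [hB]
  -- characterize the modify-fold dict
  set D := pairs.foldl (fun d q => d.modify q.1 [] (· ++ [q.2]))
      (PySem.Dict.empty : PySem.Dict Int (List String)) with hD
  have hnd : D.keys.Nodup := by
    apply PySem.Dict.nodup_keys_foldl_modify_key pairs Prod.fst [] (fun _ q => (· ++ [q.2]))
    exact PySem.Dict.nodup_keys_empty
  have hkeys : D.keys = PySem.Set.update ([] : List Int) (pairs.map Prod.fst) := by
    rw [hD]
    have := PySem.Dict.keys_foldl_modify_key (l := pairs) (key := Prod.fst) (d0 := ([] : List String))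
      (f := fun _ q => (· ++ [q.2])) (d := PySem.Dict.empty)
    simpa [PySem.Dict.keys_empty] using this
  have hgetD : ∀ k, D.getD k [] = (pairs.filter (fun r => r.1 == k)).map (·.2) := by
    intro k
    rw [hD, PySem.Dict.getD_foldl_modify_append, PySem.Dict.getD_empty]
    simp
  have hitems : D.items = D.keys.map (fun k => (k, D.getD k [])) :=
    PySem.Dict.items_eq_map_keys D hnd []
  show (toA D).items = _
  simp only [toA, hitems, hkeys, List.map_map, Function.comp_def, hgetD]
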